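-- pv_equiv track=rewrite | github.com/egonny/advent-of-code-2019 | src/day16.py | calc_phase_fast
-- ===== SOURCE A (Python) =====
-- def calc_phase_fast(phase, pos):
--     result = []
--     inter = 0
--     for i in range(len(phase) - 1, pos - 1, -1):
--         inter += phase[i]
--         result.append(abs(inter) % 10)
--     result.reverse()
--     return result
-- ===== SOURCE B (Python) =====
-- def calc_phase_fast(phase, pos):
--     # Forward subtractive scan: compute the full sum over the index range once,
--     # then emit each suffix sum before consuming its element. No reverse needed.
--     inter = sum(phase[i] for i in range(pos, len(phase)))
--     result = []
--     for i in range(pos, len(phase)):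
--         result.append(abs(inter) % 10)
--         inter -= phase[i]
--     return result
-- ===== Notes on version B (the rewrite author's own statement) =====
-- stated objective: alternative
-- what changed: Replaces A's backward accumulate-and-reverse loop by computing the total sum once and then a forward subtractive scan that emits each suffix sum (emit before subtract), returning the result in order with no reverse.
-- outside the precondition, e.g. on calc_phase_fast([1, 2], -5): A raises IndexError, B raises IndexError
import Mathlib
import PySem

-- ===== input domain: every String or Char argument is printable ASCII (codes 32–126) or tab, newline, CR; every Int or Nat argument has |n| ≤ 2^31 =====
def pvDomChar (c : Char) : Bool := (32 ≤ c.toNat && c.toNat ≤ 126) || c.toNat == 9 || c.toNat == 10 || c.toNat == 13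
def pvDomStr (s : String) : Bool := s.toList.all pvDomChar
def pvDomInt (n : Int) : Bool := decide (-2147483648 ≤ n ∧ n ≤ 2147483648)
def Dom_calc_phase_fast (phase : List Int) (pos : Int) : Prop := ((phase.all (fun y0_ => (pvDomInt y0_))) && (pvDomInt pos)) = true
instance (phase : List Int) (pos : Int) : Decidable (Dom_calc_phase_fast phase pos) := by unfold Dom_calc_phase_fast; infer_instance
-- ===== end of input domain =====

-- B replaces A's backward accumulate-then-reverse loop by one total sum followed by a
-- forward subtractive scan that emits each suffix sum directly (objective: alternative decomposition).

-- ===== PORT A =====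
-- backward loop over range(len(phase)-1, pos-1, -1), accumulating inter, then reverse
def calc_phase_fast (phase : List Int) (pos : Int) : List Int :=
  let st := (PySem.List.pyRange ((phase.length : Int) - 1) (pos - 1) (-1)).foldl
    (fun (st : List Int × Int) (i : Int) =>
      let inter := st.2 + (PySem.List.pyGet? phase i).getD 0   -- phase[i]; in range for every input admitted by Pre_
      (st.1 ++ [PySem.Int.mod |inter| 10], inter))
    ([], 0)
  st.1.reverse

-- ===== PORT B =====
def calc_phase_fast_alt (phase : List Int) (pos : Int) : List Int :=
  let idxs := PySem.List.pyRange pos (phase.length : Int) 1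
  let inter0 := (idxs.map (fun i => (PySem.List.pyGet? phase i).getD 0)).sum   -- sum(phase[i] for i in range(pos, len(phase)))
  (idxs.foldl
    (fun (st : List Int × Int) (i : Int) =>
      (st.1 ++ [PySem.Int.mod |st.2| 10], st.2 - (PySem.List.pyGet? phase i).getD 0))
    ([], inter0)).1

-- ===== PRECONDITION & SPEC =====
-- Pre_ excludes exactly the inputs where Python A raises IndexError: pos < -len(phase)
-- makes the loop reach an index below -len(phase).
def Pre_calc_phase_fast (phase : List Int) (pos : Int) : Prop := -(phase.length : Int) ≤ pos
instance (phase : List Int) (pos : Int) : Decidable (Pre_calc_phase_fast phase pos) := by unfold Pre_calc_phase_fast; infer_instance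
def pvWitness_calc_phase_fast : List Int × Int := ([3, -1, 4, 1, 5], 1)
def Spec_calc_phase_fast (phase : List Int) (pos : Int) (out : List Int) : Prop := out = calc_phase_fast_alt phase pos
instance (phase : List Int) (pos : Int) (out : List Int) : Decidable (Spec_calc_phase_fast phase pos out) := by unfold Spec_calc_phase_fast; infer_instance

-- ===== CLAIM (what is proved, stated in full; the proofs are below) =====
def Claim_equal_calc_phase_fast : Prop := ∀ (phase : List Int) (pos : Int), Dom_calc_phase_fast phase pos → Pre_calc_phase_fast phase pos → Spec_calc_phase_fast phase pos (calc_phase_fast phase pos)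

-- ===== LEMMAS AND PROOFS =====

-- g phase i = the value A and B read at index i
def pvG (phase : List Int) (i : Int) : Int := (PySem.List.pyGet? phase i).getD 0

-- reference output over an index list: each element is |suffix sum from here| mod 10
def pvRef (phase : List Int) : List Int → List Int
  | [] => []
  | i :: l => PySem.Int.mod |pvG phase i + ((l.map (fun j => pvG phase j)).sum)| 10 :: pvRef phase l

-- A's fold, written as a foldr over the ascending index list
lemma pvA_foldr (phase : List Int) (l : List Int) :
    (l.foldr (fun i (st : List Int × Int) =>
        (st.1 ++ [PySem.Int.mod |st.2 + pvG phase i| 10], st.2 + pvG phase i)) ([], 0))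
      = ((pvRef phase l).reverse, (l.map (fun j => pvG phase j)).sum) := by
  induction l with
  | nil => simp [pvRef]
  | cons i l ih =>
      simp only [List.foldr_cons, ih, pvRef, List.map_cons, List.sum_cons, List.reverse_cons]
      rw [add_comm (pvG phase i)]

-- B's fold appends exactly pvRef when started at the total suffix sum
lemma pvB_foldl (phase : List Int) (l : List Int) (acc : List Int) :
    (l.foldl (fun (st : List Int × Int) i =>
        (st.1 ++ [PySem.Int.mod |st.2| 10], st.2 - pvG phase i)) (acc, (l.map (fun j => pvG phase j)).sum)).1
      = acc ++ pvRef phase l := by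
  induction l generalizing acc with
  | nil => simp [pvRef]
  | cons i l ih =>
      simp only [List.foldl_cons, List.map_cons, List.sum_cons, pvRef]
      have h : pvG phase i + (l.map (fun j => pvG phase j)).sum - pvG phase i = (l.map (fun j => pvG phase j)).sum := by ring
      rw [h, ih]
      simp

-- ===== VERDICT (by name: the statement is the Claim_ definition above) =====
theorem calc_phase_fast_spec : Claim_equal_calc_phase_fast := by
  intro phase pos _ _
  unfold Spec_calc_phase_fast calc_phase_fast calc_phase_fast_alt
  have hrev : PySem.List.pyRange ((phase.length : Int) - 1) (pos - 1) (-1)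
      = (PySem.List.pyRange pos (phase.length : Int) 1).reverse := by
    rw [PySem.List.pyRange_neg_one_eq_reverse]
    norm_num
  rw [hrev]
  set l := PySem.List.pyRange pos (phase.length : Int) 1 with hl
  simp only [List.foldl_reverse]
  have ha := pvA_foldr phase l
  simp only [pvG] at ha
  have hb := pvB_foldl phase l []
  simp only [pvG] at hb
  simp only [ha, hb, List.reverse_reverse, List.nil_append]
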